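-- pv_equiv track=rewrite | github.com/z2labplus/mjlab | backend/mahjong_analyzer_exhaustive_fixed.py | _check_thirteen_orphans_exhaustive
-- ===== SOURCE A (Python) =====
-- def _check_thirteen_orphans_exhaustive(counts):
--     """检查国士无双"""
--     yaochuhai = [0, 8, 9, 17, 18, 26, 27, 28, 29, 30, 31, 32, 33]
--
--     has_pair = False
--     for idx in yaochuhai:
--         if counts[idx] == 0:
--             return False
--         elif counts[idx] == 2:
--             if has_pair:
--                 return False
--             has_pair = True
--         elif counts[idx] != 1:
--             return False
--
--     # 检查其他牌是否为0
--     for i in range(34):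
--         if i not in yaochuhai and counts[i] != 0:
--             return False
--
--     return has_pair
-- ===== SOURCE B (Python) =====
-- def _check_thirteen_orphans_exhaustive(counts):
--     """检查国士无双"""
--     yaochuhai = [0, 8, 9, 17, 18, 26, 27, 28, 29, 30, 31, 32, 33]
--     if len(counts) < 34:
--         return False
--     term = [counts[i] for i in yaochuhai]
--     return (min(term) >= 1 and max(term) <= 2 and sum(term) == 14
--             and not any(counts[i] for i in range(34) if i not in yaochuhai))
-- ===== Notes on version B (the rewrite author's own statement) =====
-- stated objective: simpler
-- what changed: Replaces A's flag-threading early-return branch scan by an arithmetic characterization: gather the 13 terminal counts and test min>=1, max<=2 and sum==14 (13 ones plus exactly one pair), plus one aggregate any() for the non-terminal slots, with a length guard instead of mid-loop IndexErrors.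
import Mathlib
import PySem

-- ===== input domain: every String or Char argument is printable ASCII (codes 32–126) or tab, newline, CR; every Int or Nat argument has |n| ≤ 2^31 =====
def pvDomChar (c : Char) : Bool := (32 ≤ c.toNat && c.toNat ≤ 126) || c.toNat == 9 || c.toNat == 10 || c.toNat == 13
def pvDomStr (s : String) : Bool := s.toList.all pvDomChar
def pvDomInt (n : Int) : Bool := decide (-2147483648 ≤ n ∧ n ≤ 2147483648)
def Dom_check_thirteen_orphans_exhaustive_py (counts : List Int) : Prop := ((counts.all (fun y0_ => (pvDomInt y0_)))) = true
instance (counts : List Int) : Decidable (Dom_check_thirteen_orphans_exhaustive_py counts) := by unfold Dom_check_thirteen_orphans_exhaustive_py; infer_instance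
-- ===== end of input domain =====

-- B replaces A's early-return branch scan threading a has_pair flag by an arithmetic
-- characterization of the 13 terminal counts (min >= 1, max <= 2, sum == 14) plus one
-- aggregate check that the non-terminal slots are zero (objective: simpler).

-- ===== PORT A =====
def pvYaoA : List Int := [0, 8, 9, 17, 18, 26, 27, 28, 29, 30, 31, 32, 33]

-- second loop of A: for i in range(34): if i not in yaochuhai and counts[i] != 0: return False
def pvALoop2 (counts : List Int) : List Int → Bool → Option Bool
  | [], hasPair => some hasPair
  | i :: rest, hasPair =>
    if i ∈ pvYaoA then pvALoop2 counts rest hasPair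
    else
      match PySem.List.pyGet? counts i with
      | none => none  -- IndexError
      | some c => if c ≠ 0 then some false else pvALoop2 counts rest hasPair

-- first loop of A over the yaochuhai indices, threading has_pair
def pvALoop1 (counts : List Int) : List Int → Bool → Option Bool
  | [], hasPair => pvALoop2 counts (PySem.List.pyRange 0 34 1) hasPair
  | idx :: rest, hasPair =>
    match PySem.List.pyGet? counts idx with
    | none => none  -- IndexError
    | some c =>
      if c = 0 then some false
      else if c = 2 then
        if hasPair then some false else pvALoop1 counts rest true
      else if c ≠ 1 then some false
      else pvALoop1 counts rest hasPair

def check_thirteen_orphans_exhaustive_py (counts : List Int) : Bool :=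
  (pvALoop1 counts pvYaoA false).getD false

-- ===== PORT B =====
-- not any(counts[i] for i in range(34) if i not in yaochuhai)
-- (the .getD 0 default is unreachable: B reads it only under the length guard)
def pvBAll (counts : List Int) : List Int → Bool
  | [] => true
  | i :: rest =>
    if i ∈ ([0, 8, 9, 17, 18, 26, 27, 28, 29, 30, 31, 32, 33] : List Int) then pvBAll counts rest
    else ((PySem.List.pyGet? counts i).getD 0 == 0) && pvBAll counts rest

def check_thirteen_orphans_exhaustive_py_alt (counts : List Int) : Bool :=
  if counts.length < 34 then false
  else
    -- term = [counts[i] for i in yaochuhai]; in range under the guard, so .getD 0 is unreachable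
    let term := ([0, 8, 9, 17, 18, 26, 27, 28, 29, 30, 31, 32, 33] : List Int).map
      (fun i => (PySem.List.pyGet? counts i).getD 0)
    match PySem.List.min? term (fun x => x), PySem.List.max? term (fun x => x) with
    | some mn, some mx =>
        decide (1 ≤ mn) && decide (mx ≤ 2) && (term.sum == 14) &&
          pvBAll counts (PySem.List.pyRange 0 34 1)
    | _, _ => false  -- unreachable: term is a nonempty literal-index list

-- ===== PRECONDITION & SPEC =====
-- Pre_ excludes exactly the inputs on which Python A raises IndexError: lists shorter than
-- 34 whose in-range terminal slots all hold 1 or 2 with at most one 2, so that A's first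
-- loop reaches an out-of-range terminal index.
def Pre_check_thirteen_orphans_exhaustive_py (counts : List Int) : Prop :=
  34 ≤ counts.length ∨
  ¬ ((∀ i ∈ ([0, 8, 9, 17, 18, 26, 27, 28, 29, 30, 31, 32, 33] : List Nat),
        i < counts.length → counts.getD i 0 = 1 ∨ counts.getD i 0 = 2) ∧
     ([0, 8, 9, 17, 18, 26, 27, 28, 29, 30, 31, 32, 33] : List Nat).countP
        (fun i => decide (i < counts.length) && decide (counts.getD i 0 = 2)) ≤ 1)
instance (counts : List Int) : Decidable (Pre_check_thirteen_orphans_exhaustive_py counts) := by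
  unfold Pre_check_thirteen_orphans_exhaustive_py; infer_instance

def pvWitness_check_thirteen_orphans_exhaustive_py : List Int :=
  [2, 0, 0, 0, 0, 0, 0, 0, 1, 1, 0, 0, 0, 0, 0, 0, 0, 1, 1, 0, 0, 0, 0, 0, 0, 0, 1, 1, 1, 1, 1, 1, 1, 1]

def Spec_check_thirteen_orphans_exhaustive_py (counts : List Int) (out : Bool) : Prop := out = check_thirteen_orphans_exhaustive_py_alt counts
instance (counts : List Int) (out : Bool) : Decidable (Spec_check_thirteen_orphans_exhaustive_py counts out) := by unfold Spec_check_thirteen_orphans_exhaustive_py; infer_instance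

-- ===== CLAIM (what is proved, stated in full; the proofs are below) =====
def Claim_equal_check_thirteen_orphans_exhaustive_py : Prop := ∀ (counts : List Int), Dom_check_thirteen_orphans_exhaustive_py counts → Pre_check_thirteen_orphans_exhaustive_py counts → Spec_check_thirteen_orphans_exhaustive_py counts (check_thirteen_orphans_exhaustive_py counts)

-- ===== LEMMAS AND PROOFS =====

-- the value counts[idx] that both ports read at a terminal index
def pvVal (counts : List Int) (idx : Int) : Int := (PySem.List.pyGet? counts idx).getD 0

-- SHORT LISTS: A's first loop can never produce `some true` when counts has fewer than 34
-- elements, because finishing the loop requires a successful read at index 33.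
theorem pvShort (counts : List Int) (l : List Int) (hp : Bool)
    (h33 : (33 : Int) ∈ l) (hlen : counts.length < 34) :
    (pvALoop1 counts l hp).getD false = false := by
  induction l generalizing hp with
  | nil => cases h33
  | cons idx rest ih =>
    cases hget : PySem.List.pyGet? counts idx with
    | none => simp [pvALoop1, hget]
    | some c =>
      have hne : idx ≠ 33 := by
        intro h; subst h
        rw [PySem.List.pyGet?_of_nonneg counts (by norm_num : (0:Int) ≤ 33)] at hget
        obtain ⟨hlt, -⟩ := List.getElem?_eq_some_iff.mp hget
        omega
      have h33' : (33 : Int) ∈ rest := by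
        rcases List.mem_cons.mp h33 with h | h
        · exact absurd h.symm hne
        · exact h
      by_cases h0 : c = 0
      · simp [pvALoop1, hget, h0]
      · by_cases h2 : c = 2
        · cases hp <;> simp [pvALoop1, hget, h0, h2, ih _ h33']
        · by_cases h1 : c = 1
          · simp [pvALoop1, hget, h0, h2, h1, ih _ h33']
          · simp [pvALoop1, hget, h0, h2, h1]

-- A's second loop = B's aggregate `not any(...)`, when every index it reads is in range
theorem pvLoop2_eq (counts : List Int) (l : List Int) (hp : Bool)
    (h : ∀ i ∈ l, 0 ≤ i ∧ i.toNat < counts.length) :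
    pvALoop2 counts l hp = some (hp && pvBAll counts l) := by
  induction l with
  | nil => simp [pvALoop2, pvBAll]
  | cons i rest ih =>
    have hi := h i (List.mem_cons_self)
    have hrest : ∀ j ∈ rest, 0 ≤ j ∧ j.toNat < counts.length :=
      fun j hj => h j (List.mem_cons_of_mem _ hj)
    have hget : PySem.List.pyGet? counts i = some counts[i.toNat] := by
      rw [PySem.List.pyGet?_of_nonneg counts hi.1]
      exact List.getElem?_eq_some_iff.mpr ⟨hi.2, rfl⟩
    by_cases hmem : i ∈ pvYaoA
    · have hd : i = 0 ∨ i = 8 ∨ i = 9 ∨ i = 17 ∨ i = 18 ∨ i = 26 ∨ i = 27 ∨ i = 28 ∨ i = 29 ∨ i = 30 ∨ i = 31 ∨ i = 32 ∨ i = 33 := by simpa [pvYaoA] using hmem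
      simp [pvALoop2, pvBAll, hmem, hd, ih hrest]
    · have hd : ¬(i = 0 ∨ i = 8 ∨ i = 9 ∨ i = 17 ∨ i = 18 ∨ i = 26 ∨ i = 27 ∨ i = 28 ∨ i = 29 ∨ i = 30 ∨ i = 31 ∨ i = 32 ∨ i = 33) := by simpa [pvYaoA] using hmem
      by_cases hc : counts[i.toNat] = 0
      · simp [pvALoop2, pvBAll, hmem, hd, hget, hc, ih hrest]
      · have hb : (counts[i.toNat] == (0 : Int)) = false := beq_eq_false_iff_ne.mpr hc
        simp [pvALoop2, pvBAll, hmem, hd, hget, hc, hb]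

-- A's first loop in closed form over the values it reads (all reads in range)
theorem pvLoop1_eq (counts : List Int) (l : List Int) (hp : Bool)
    (hin : ∀ idx ∈ l, PySem.List.pyGet? counts idx = some (pvVal counts idx))
    (hall : ∀ i ∈ PySem.List.pyRange 0 34 1, 0 ≤ i ∧ i.toNat < counts.length) :
    pvALoop1 counts l hp =
      some (if ((l.map (pvVal counts)).all (fun v => (v == 1) || (v == 2))
                 ∧ (l.map (pvVal counts)).count 2 + (cond hp 1 0) ≤ 1)
            then ((hp || ((l.map (pvVal counts)).count 2 == 1)) &&
                    pvBAll counts (PySem.List.pyRange 0 34 1))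
            else false) := by
  induction l generalizing hp with
  | nil =>
    rw [pvALoop1, pvLoop2_eq counts _ hp hall]
    cases hp <;> simp
  | cons idx rest ih =>
    have hget := hin idx (List.mem_cons_self)
    have hrest : ∀ j ∈ rest, PySem.List.pyGet? counts j = some (pvVal counts j) :=
      fun j hj => hin j (List.mem_cons_of_mem _ hj)
    set vals := rest.map (pvVal counts) with hv
    set c := pvVal counts idx with hc
    have hmap : (idx :: rest).map (pvVal counts) = c :: vals := by
      rw [List.map_cons]
    rw [pvALoop1, hget, hmap]
    dsimp only
    by_cases h0 : c = 0
    · rw [if_pos h0, if_neg]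
      rintro ⟨ha, -⟩
      simp [List.all_cons, h0] at ha
    · by_cases h2 : c = 2
      · rw [if_neg h0, if_pos h2]
        cases hp with
        | true =>
          rw [if_pos rfl, if_neg]
          rintro ⟨-, hcnt⟩
          simp [List.count_cons, h2] at hcnt
        | false =>
          rw [if_neg (by simp), ih true hrest]
          apply congrArg
          simp only [List.all_cons, List.count_cons, h2, cond_true, cond_false]
          norm_num
          by_cases hz : List.count 2 vals = 0
          · simp [hz]
          · simp [hz]
      · by_cases h1 : c = 1
        · rw [if_neg h0, if_neg h2, if_neg (by simp [h1]), ih hp hrest]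
          apply congrArg
          simp only [List.all_cons, List.count_cons, h1, cond_true, cond_false]
          norm_num
        · rw [if_neg h0, if_neg h2, if_pos h1, if_neg]
          rintro ⟨ha, -⟩
          simp only [List.all_cons, Bool.and_eq_true, Bool.or_eq_true, beq_iff_eq] at ha
          rcases ha.1 with h | h
          · exact h1 h
          · exact h2 h

-- sum of a {1,2}-valued list = length + number of 2s
theorem pvSumCount (l : List Int) (h : ∀ v ∈ l, v = 1 ∨ v = 2) :
    l.sum = (l.length : Int) + (l.count 2 : Int) := by
  induction l with
  | nil => simp
  | cons v rest ih =>
    have hv := h v (List.mem_cons_self)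
    have hrest := ih (fun w hw => h w (List.mem_cons_of_mem _ hw))
    rcases hv with h1 | h2
    · subst h1
      simp [List.count_cons, hrest]
      push_cast; ring
    · subst h2
      simp [List.count_cons, hrest]
      push_cast; ring

-- the arithmetic characterization: for the 13 terminal values,
-- min >= 1 ∧ max <= 2 ∧ sum = 14  ↔  all ∈ {1,2} ∧ exactly one 2
theorem pvArith (term : List Int) (mn mx : Int)
    (hlen : term.length = 13)
    (hmn : PySem.List.min? term (fun x => x) = some mn)
    (hmx : PySem.List.max? term (fun x => x) = some mx) :
    ((1 ≤ mn ∧ mx ≤ 2) ∧ term.sum = 14)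
      ↔ ((∀ v ∈ term, v = 1 ∨ v = 2) ∧ term.count 2 = 1) := by
  have hmnmem : mn ∈ term := PySem.List.min?_mem hmn
  have hmxmem : mx ∈ term := PySem.List.max?_mem hmx
  have hmnmin : ∀ y ∈ term, mn ≤ y := PySem.List.min?_isMin hmn
  have hmxmax : ∀ y ∈ term, y ≤ mx := PySem.List.max?_isMax hmx
  constructor
  · rintro ⟨⟨h1, h2⟩, hsum⟩
    have hall : ∀ v ∈ term, v = 1 ∨ v = 2 := by
      intro v hv
      have := hmnmin v hv
      have := hmxmax v hv
      omega
    refine ⟨hall, ?_⟩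
    have := pvSumCount term hall
    rw [hlen] at this
    omega
  · rintro ⟨hall, hcnt⟩
    have hsum := pvSumCount term hall
    rw [hlen, hcnt] at hsum
    refine ⟨⟨?_, ?_⟩, by omega⟩
    · rcases hall mn hmnmem with h | h <;> omega
    · rcases hall mx hmxmem with h | h <;> omega

-- the two ports agree on lists of length ≥ 34
theorem pvLong (counts : List Int) (h34 : 34 ≤ counts.length) :
    check_thirteen_orphans_exhaustive_py counts = check_thirteen_orphans_exhaustive_py_alt counts := by
  have hyao : ∀ idx ∈ pvYaoA, PySem.List.pyGet? counts idx = some (pvVal counts idx) := by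
    intro idx hidx
    have hrange : 0 ≤ idx ∧ idx.toNat < counts.length := by
      fin_cases hidx <;> constructor <;> simp_all <;> omega
    rw [PySem.List.pyGet?_of_nonneg counts hrange.1,
        List.getElem?_eq_some_iff.mpr ⟨hrange.2, rfl⟩]
    simp [pvVal, PySem.List.pyGet?_of_nonneg counts hrange.1,
      List.getElem?_eq_some_iff.mpr ⟨hrange.2, rfl⟩]
  have hall : ∀ i ∈ PySem.List.pyRange 0 34 1, 0 ≤ i ∧ i.toNat < counts.length := by
    intro i hi
    obtain ⟨ha, hb, -⟩ := (PySem.List.mem_pyRange_iff_of_pos (by omega) i).mp hi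
    omega
  -- A side in closed form
  rw [check_thirteen_orphans_exhaustive_py, pvLoop1_eq counts pvYaoA false hyao hall]
  -- B side
  rw [check_thirteen_orphans_exhaustive_py_alt,
    if_neg (show ¬ (counts.length < 34) by omega)]
  have hterm : ([0, 8, 9, 17, 18, 26, 27, 28, 29, 30, 31, 32, 33] : List Int).map
        (fun i => (PySem.List.pyGet? counts i).getD 0)
      = pvYaoA.map (pvVal counts) := rfl
  set term := pvYaoA.map (pvVal counts) with hterm_def
  have hlen13 : term.length = 13 := by simp [hterm_def, pvYaoA]
  have hne : term ≠ [] := by intro h; rw [h] at hlen13; simp at hlen13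
  obtain ⟨mn, hmn⟩ : ∃ mn, PySem.List.min? term (fun x => x) = some mn := by
    cases h : PySem.List.min? term (fun x => x) with
    | none => exact absurd ((PySem.List.min?_eq_none_iff term (fun x => x)).mp h) hne
    | some mn => exact ⟨mn, rfl⟩
  obtain ⟨mx, hmx⟩ : ∃ mx, PySem.List.max? term (fun x => x) = some mx := by
    cases h : PySem.List.max? term (fun x => x) with
    | none => exact absurd ((PySem.List.max?_eq_none_iff term (fun x => x)).mp h) hne
    | some mx => exact ⟨mx, rfl⟩
    
  rw [hterm]
  dsimp only
  rw [hmn, hmx]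
  simp only [Option.getD_some]
  have hiff := pvArith term mn mx hlen13 hmn hmx
  -- both sides as Bools
  by_cases hok : (∀ v ∈ term, v = 1 ∨ v = 2) ∧ term.count 2 = 1
  · have h1 := hiff.mpr hok
    have hallb : term.all (fun v => (v == 1) || (v == 2)) = true := by
      rw [List.all_eq_true]; intro v hv
      rcases hok.1 v hv with h | h <;> simp [h]
    rw [if_pos ⟨hallb, by rw [hok.2]; simp⟩]
    simp [hok.2, h1.1.1, h1.1.2, h1.2]
  · have h2 : ¬ ((1 ≤ mn ∧ mx ≤ 2) ∧ term.sum = 14) := fun h => hok (hiff.mp h)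
    by_cases hallp : ∀ v ∈ term, v = 1 ∨ v = 2
    · -- all in {1,2} but count 2 ≠ 1
      have hcnt : term.count 2 ≠ 1 := fun h => hok ⟨hallp, h⟩
      by_cases hc1 : (term.count 2 + cond false 1 0 ≤ 1)
      · -- count 2 = 0: A's then-branch gives false; B: sum = 13 ≠ 14
        have hcnt0 : term.count 2 = 0 := by simp at hc1; omega
        have hallb : term.all (fun v => (v == 1) || (v == 2)) = true := by
          rw [List.all_eq_true]; intro v hv
          rcases hallp v hv with h | h <;> simp [h]
        rw [if_pos ⟨hallb, by omega⟩]
        have hsum : term.sum = 13 := by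
          have := pvSumCount term hallp; rw [hlen13, hcnt0] at this; omega
        simp [hcnt0, hsum]
      · -- count 2 ≥ 2: A's else gives false; B: sum ≥ 15
        rw [if_neg (by intro h; exact hc1 h.2)]
        have hsum : term.sum ≠ 14 := by
          have := pvSumCount term hallp
          rw [hlen13] at this
          simp at hc1; omega
        simp [hsum]
    · -- some value outside {1,2}: A's else gives false; B: min/max/sum test fails
      rw [if_neg]
      · rcases not_forall.mp hallp with ⟨v, hv⟩
        rcases Classical.not_imp.mp hv with ⟨hvmem, hvval⟩
        push_neg at hvval
        by_cases hb1 : 1 ≤ mn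
        · by_cases hb2 : mx ≤ 2
          · exfalso
            have := PySem.List.min?_isMin hmn v hvmem
            have := PySem.List.max?_isMax hmx v hvmem
            simp only at *
            omega
          · simp [hb2]
        · simp [hb1]
      · intro ⟨ha, _⟩
        apply hallp
        intro v hv
        have := List.all_eq_true.mp ha v hv
        rcases Bool.or_eq_true_iff.mp this with h | h
        · left; exact (by simpa using h)
        · right; exact (by simpa using h)

-- ===== VERDICT (by name: the statement is the Claim_ definition above) =====
theorem check_thirteen_orphans_exhaustive_py_spec : Claim_equal_check_thirteen_orphans_exhaustive_py := by
  intro counts _ _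
  unfold Spec_check_thirteen_orphans_exhaustive_py
  by_cases h34 : counts.length < 34
  · rw [check_thirteen_orphans_exhaustive_py,
      pvShort counts pvYaoA false (by decide) h34]
    rw [check_thirteen_orphans_exhaustive_py_alt, if_pos h34]
  · exact pvLong counts (by omega)
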